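-- pv_equiv track=rewrite | github.com/oblivi-ate/AI_project | vertify.py | verify_coverage
-- ===== SOURCE A (Python) =====
-- from itertools import combinations
--
-- def verify_coverage(solution, n, k, j, s, strict_coverage=False, min_cover=1):
--     """验证解是否正确覆盖所有组合"""
--     # 基本验证
--     if not solution:
--         return False
--
--     # 验证每个集合的大小是否为k
--     for group in solution:
--         if len(group) != k or not all(0 <= x < n for x in group):
--             return False
--
--     # 获取所有j组合并检查覆盖情况
--     j_combinations = list(combinations(range(n), j))
--     solution_sets = [set(group) for group in solution]
--
--     for j_comb in j_combinations:
--         if strict_coverage: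
--             # 严格覆盖模式：至少一个k集合包含所有s组合
--             covered = False
--             for group in solution_sets:
--                 s_combinations = list(combinations(j_comb, s))
--                 if all(set(s_comb).issubset(group) for s_comb in s_combinations):
--                     covered = True
--                     break
--             if not covered:
--                 return False
--         else:
--             # 宽松覆盖模式：至少一个k集合包含指定数量的s组合
--             s_combinations = list(combinations(j_comb, s))
--             # 检查至少有1个k集合包含至少min_cover的s组合
--             covered = False
--             count = 0
--             for s_comb in s_combinations:
--                 for group in solution_sets:
--                     if set(s_comb).issubset(group):
--                         count += 1
--                         if count >= min_cover:
--                             covered = True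
--                             break
--                 if covered:
--                     break
--             if not covered:
--                 return False
--
--     return True
-- ===== SOURCE B (Python) =====
-- from itertools import combinations
-- from math import comb
--
-- def verify_coverage(solution, n, k, j, s, strict_coverage=False, min_cover=1):
--     """Verify coverage by counting s-subsets per group with a binomial closed form."""
--     if not solution:
--         return False
--     for group in solution:
--         if len(group) != k or not all(0 <= x < n for x in group):
--             return False
--     groups = [set(g) for g in solution]
--     need = max(min_cover, 1)
--     for j_comb in combinations(range(n), j):
--         if strict_coverage:
--             if not (1 <= s <= j):
--                 continue  # the "all s-subsets" condition is vacuous/trivial here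
--             if not any(all(x in g for x in j_comb) for g in groups):
--                 return False
--         else:
--             # number of (s_comb, group) incidences = sum over groups of C(|j_comb ∩ g|, s)
--             total = sum(comb(sum(1 for x in j_comb if x in g), s) for g in groups)
--             if total < need:
--                 return False
--     return True
-- ===== Notes on version B (the rewrite author's own statement) =====
-- stated objective: alternative
-- what changed: Per j-combination, the nested enumeration of all C(j,s) s-subsets is replaced by a binomial closed form: in loose mode the number of (s-subset, group) incidences is computed as sum over groups of C(|j_comb ∩ group|, s), and in strict mode the s-subset loop is dropped entirely in favour of a direct j_comb ⊆ group test (trivially satisfied unless 1 <= s <= j).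
import Mathlib
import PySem

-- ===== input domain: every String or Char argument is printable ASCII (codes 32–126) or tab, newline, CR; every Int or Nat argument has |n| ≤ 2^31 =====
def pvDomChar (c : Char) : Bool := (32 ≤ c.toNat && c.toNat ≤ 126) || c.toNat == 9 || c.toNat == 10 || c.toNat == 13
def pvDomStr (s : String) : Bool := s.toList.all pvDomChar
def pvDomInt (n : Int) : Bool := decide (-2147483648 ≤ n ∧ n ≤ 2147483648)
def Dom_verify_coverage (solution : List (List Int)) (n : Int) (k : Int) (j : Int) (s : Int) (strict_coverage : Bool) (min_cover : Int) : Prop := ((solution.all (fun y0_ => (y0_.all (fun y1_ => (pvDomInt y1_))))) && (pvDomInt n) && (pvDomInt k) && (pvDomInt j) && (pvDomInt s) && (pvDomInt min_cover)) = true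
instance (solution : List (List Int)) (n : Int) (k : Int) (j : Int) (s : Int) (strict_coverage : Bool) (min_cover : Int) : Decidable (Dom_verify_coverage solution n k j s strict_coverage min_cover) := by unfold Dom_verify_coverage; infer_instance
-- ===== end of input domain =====

-- B replaces A's per-j-combination enumeration of all s-subsets by a binomial closed form
-- (loose mode: #incidences = Σ_g C(|j_comb ∩ g|, s); strict mode: a direct j_comb ⊆ group test);
-- objective: alternative.

-- ===== PORT A =====
-- itertools.combinations(l, r), lexicographic order (hand-ported, exact for r ≥ 0)
def pyCombos : List Int → Nat → List (List Int)
  | _, 0 => [[]]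
  | [], _ + 1 => []
  | x :: xs, r + 1 => ((pyCombos xs r).map (fun c => x :: c)) ++ pyCombos xs (r + 1)

-- A's inner loop 'for group in solution_sets: if subset: count += 1; if count >= min_cover: covered'
def vcInner (min_cover : Int) (s_comb : List Int) : List (PySem.Set Int) → Int → Int × Bool
  | [], count => (count, false)
  | g :: gs, count =>
    if PySem.Set.issubset (PySem.Set.ofList s_comb) g then
      if min_cover ≤ count + 1 then (count + 1, true)
      else vcInner min_cover s_comb gs (count + 1)
    else vcInner min_cover s_comb gs count

-- A's outer loose loop 'for s_comb in s_combinations: … if covered: break'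
def vcOuter (min_cover : Int) (sets : List (PySem.Set Int)) : List (List Int) → Int → Bool
  | [], _ => false
  | sc :: rest, count =>
    let r := vcInner min_cover sc sets count
    if r.2 then true else vcOuter min_cover sets rest r.1

def verify_coverage (solution : List (List Int)) (n : Int) (k : Int) (j : Int) (s : Int) (strict_coverage : Bool) (min_cover : Int) : Bool :=
  if solution.isEmpty then false
  else if !(solution.all fun group => decide ((group.length : Int) = k) && group.all (fun x => decide (0 ≤ x) && decide (x < n))) then false
  else
    let j_combinations := pyCombos (PySem.List.pyRange 0 n 1) j.toNat
    let solution_sets := solution.map PySem.Set.ofList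
    j_combinations.all (fun j_comb =>
      if strict_coverage then
        solution_sets.any (fun group =>
          (pyCombos j_comb s.toNat).all (fun s_comb => PySem.Set.issubset (PySem.Set.ofList s_comb) group))
      else
        vcOuter min_cover solution_sets (pyCombos j_comb s.toNat) 0)

-- ===== PORT B =====
def verify_coverage_alt (solution : List (List Int)) (n : Int) (k : Int) (j : Int) (s : Int) (strict_coverage : Bool) (min_cover : Int) : Bool :=
  if solution.isEmpty then false
  else if !(solution.all fun group => decide ((group.length : Int) = k) && group.all (fun x => decide (0 ≤ x) && decide (x < n))) then false
  else
    let groups := solution.map PySem.Set.ofList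
    let need := max min_cover 1
    (pyCombos (PySem.List.pyRange 0 n 1) j.toNat).all (fun j_comb =>
      if strict_coverage then
        if !(decide (1 ≤ s) && decide (s ≤ j)) then true
        else groups.any (fun g => j_comb.all (fun x => PySem.Set.contains g x))
      else
        let total := (groups.map (fun g => ((Nat.choose (j_comb.countP (fun x => PySem.Set.contains g x)) s.toNat : Nat) : Int))).sum
        decide (need ≤ total))

-- ===== PRECONDITION & SPEC =====
-- Pre_ excludes EXACTLY the inputs on which the Python A raises ValueError (a negative j, or a
-- negative s that is actually reached because some j-combination exists), reached only when the
-- solution is nonempty and every group passes the size/range check; A returns on all other inputs.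
def Pre_verify_coverage (solution : List (List Int)) (n : Int) (k : Int) (j : Int) (s : Int) (strict_coverage : Bool) (min_cover : Int) : Prop :=
  solution = [] ∨
  (∃ g ∈ solution, ¬((g.length : Int) = k ∧ ∀ x ∈ g, 0 ≤ x ∧ x < n)) ∨
  (0 ≤ j ∧ (0 ≤ s ∨ max n 0 < j))
instance (solution : List (List Int)) (n : Int) (k : Int) (j : Int) (s : Int) (strict_coverage : Bool) (min_cover : Int) : Decidable (Pre_verify_coverage solution n k j s strict_coverage min_cover) := by unfold Pre_verify_coverage; infer_instance

def pvWitness_verify_coverage : List (List Int) × Int × Int × Int × Int × Bool × Int := ([[0]], 1, 1, 1, 1, false, 1)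

def Spec_verify_coverage (solution : List (List Int)) (n : Int) (k : Int) (j : Int) (s : Int) (strict_coverage : Bool) (min_cover : Int) (out : Bool) : Prop := out = verify_coverage_alt solution n k j s strict_coverage min_cover
instance (solution : List (List Int)) (n : Int) (k : Int) (j : Int) (s : Int) (strict_coverage : Bool) (min_cover : Int) (out : Bool) : Decidable (Spec_verify_coverage solution n k j s strict_coverage min_cover out) := by unfold Spec_verify_coverage; infer_instance

-- ===== CLAIM (what is proved, stated in full; the proofs are below) =====
def Claim_equal_verify_coverage : Prop := ∀ (solution : List (List Int)) (n : Int) (k : Int) (j : Int) (s : Int) (strict_coverage : Bool) (min_cover : Int), Dom_verify_coverage solution n k j s strict_coverage min_cover → Pre_verify_coverage solution n k j s strict_coverage min_cover → Spec_verify_coverage solution n k j s strict_coverage min_cover (verify_coverage solution n k j s strict_coverage min_cover)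

-- ===== LEMMAS AND PROOFS =====

theorem length_of_mem_pyCombos : ∀ (l : List Int) (r : Nat) (c : List Int), c ∈ pyCombos l r → c.length = r := by
  intro l
  induction l with
  | nil => intro r c h; cases r with
    | zero => simp [pyCombos] at h; simp [h]
    | succ r => simp [pyCombos] at h
  | cons x xs ih =>
    intro r c h
    cases r with
    | zero => simp [pyCombos] at h; simp [h]
    | succ r =>
      simp [pyCombos] at h
      rcases h with ⟨c', hc', rfl⟩ | h
      · simp [ih r c' hc']
      · exact ih (r+1) c h

theorem sublist_of_mem_pyCombos : ∀ (l : List Int) (r : Nat) (c : List Int), c ∈ pyCombos l r → c.Sublist l := by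
  intro l
  induction l with
  | nil => intro r c h; cases r with
    | zero => simp [pyCombos] at h; simp [h]
    | succ r => simp [pyCombos] at h
  | cons x xs ih =>
    intro r c h
    cases r with
    | zero => simp [pyCombos] at h; simp [h]
    | succ r =>
      simp [pyCombos] at h
      rcases h with ⟨c', hc', rfl⟩ | h
      · exact List.Sublist.cons₂ x (ih r c' hc')
      · exact List.Sublist.cons x (ih (r+1) c h)

theorem pyCombos_eq_nil : ∀ (l : List Int) (r : Nat), l.length < r → pyCombos l r = [] := by
  intro l
  induction l with
  | nil => intro r h; cases r with
    | zero => omega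
    | succ r => simp [pyCombos]
  | cons x xs ih =>
    intro r h
    cases r with
    | zero => simp at h
    | succ r =>
      simp at h
      simp [pyCombos, ih r (by omega), ih (r+1) (by omega)]

theorem pyCombos_ne_nil : ∀ (l : List Int) (r : Nat), r ≤ l.length → pyCombos l r ≠ [] := by
  intro l
  induction l with
  | nil => intro r h; simp at h; subst h; simp [pyCombos]
  | cons x xs ih =>
    intro r h
    cases r with
    | zero => simp [pyCombos]
    | succ r =>
      simp at h
      simp only [pyCombos, ne_eq, List.append_eq_nil_iff, List.map_eq_nil_iff, not_and]
      intro h1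
      exact absurd h1 (ih r h)

theorem pyCombos_full : ∀ (l : List Int), pyCombos l l.length = [l] := by
  intro l
  induction l with
  | nil => simp [pyCombos]
  | cons x xs ih =>
    simp only [List.length_cons, pyCombos, ih, pyCombos_eq_nil xs (xs.length+1) (by omega)]
    simp

theorem exists_mem_pyCombos : ∀ (l : List Int) (r : Nat), 1 ≤ r → r ≤ l.length → ∀ x ∈ l, ∃ c ∈ pyCombos l r, x ∈ c := by
  intro l
  induction l with
  | nil => intro r h1 h2; simp at h2; omega
  | cons y ys ih =>
    intro r h1 h2 x hx
    cases r with
    | zero => omega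
    | succ r =>
      simp at h2
      rcases List.mem_cons.mp hx with rfl | hx'
      · -- x = y : take y :: (some element of pyCombos ys r)
        have hne : pyCombos ys r ≠ [] := pyCombos_ne_nil ys r (by omega)
        rcases List.exists_mem_of_ne_nil _ hne with ⟨c, hc⟩
        refine ⟨x :: c, ?_, by simp⟩
        simp only [pyCombos, List.mem_append, List.mem_map]
        exact Or.inl ⟨c, hc, rfl⟩
      · by_cases hr : r + 1 ≤ ys.length
        · rcases ih (r+1) h1 hr x hx' with ⟨c, hc, hxc⟩
          refine ⟨c, ?_, hxc⟩
          simp only [pyCombos, List.mem_append, List.mem_map]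
          exact Or.inr hc
        · -- ys.length = r, so ys itself is the only r-combination of ys
          have hlen : ys.length = r := by omega
          refine ⟨y :: ys, ?_, by simp [hx']⟩
          simp only [pyCombos, List.mem_append, List.mem_map]
          refine Or.inl ⟨ys, ?_, rfl⟩
          rw [← hlen, pyCombos_full]
          simp

theorem list_all_congr {α : Type} {l : List α} {f g : α → Bool} (h : ∀ x ∈ l, f x = g x) : l.all f = l.all g := by
  rw [Bool.eq_iff_iff]
  simp only [List.all_eq_true]
  exact ⟨fun H x hx => (h x hx) ▸ H x hx, fun H x hx => (h x hx) ▸ H x hx⟩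

theorem list_any_congr {α : Type} {l : List α} {f g : α → Bool} (h : ∀ x ∈ l, f x = g x) : l.any f = l.any g := by
  rw [Bool.eq_iff_iff]
  simp only [List.any_eq_true]
  exact ⟨fun ⟨x, hx, H⟩ => ⟨x, hx, (h x hx) ▸ H⟩, fun ⟨x, hx, H⟩ => ⟨x, hx, (h x hx) ▸ H⟩⟩

theorem all_pyCombos_all (p : Int → Bool) (l : List Int) (r : Nat) (h1 : 1 ≤ r) (h2 : r ≤ l.length) :
    (pyCombos l r).all (fun c => c.all p) = l.all p := by
  rw [Bool.eq_iff_iff]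
  simp only [List.all_eq_true]
  constructor
  · intro H x hx
    rcases exists_mem_pyCombos l r h1 h2 x hx with ⟨c, hc, hxc⟩
    exact H c hc x hxc
  · intro H c hc x hxc
    exact H x ((sublist_of_mem_pyCombos l r c hc).mem hxc)

theorem countP_pyCombos (p : Int → Bool) : ∀ (l : List Int) (r : Nat),
    (pyCombos l r).countP (fun c => c.all p) = Nat.choose (l.countP p) r := by
  intro l
  induction l with
  | nil => intro r; cases r with
    | zero => simp [pyCombos]
    | succ r => simp [pyCombos]
  | cons x xs ih =>
    intro r
    cases r with
    | zero => simp [pyCombos]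
    | succ r =>
      simp only [pyCombos, List.countP_append, List.countP_map]
      by_cases hp : p x
      · have : ((fun c => List.all c p) ∘ fun c => x :: c) = fun c => List.all c p := by
          funext c; simp [hp]
        rw [this, ih r, ih (r+1)]
        simp [hp, Nat.choose_succ_succ]
      · have : ((fun c => List.all c p) ∘ fun c => x :: c) = fun _ => false := by
          funext c; simp [hp]
        rw [this, ih (r+1)]
        simp [hp]

theorem issubset_ofList_eq_all (sc : List Int) (g : PySem.Set Int) :
    PySem.Set.issubset (PySem.Set.ofList sc) g = sc.all (fun x => PySem.Set.contains g x) := by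
  rw [Bool.eq_iff_iff]
  simp only [PySem.Set.issubset_iff, List.all_eq_true, PySem.Set.mem_ofList, PySem.Set.contains_iff]

theorem sum_map_add_nat {β : Type} (B : List β) (f g : β → Nat) :
    (B.map (fun b => f b + g b)).sum = (B.map f).sum + (B.map g).sum := by
  induction B with
  | nil => simp
  | cons b B' ih => simp only [List.map_cons, List.sum_cons, ih]; omega

theorem sum_map_ite_nat {β : Type} (B : List β) (p : β → Bool) :
    (B.map (fun b => if p b = true then 1 else 0)).sum = B.countP p := by
  induction B with
  | nil => simp
  | cons b B' ih =>
    simp only [List.map_cons, List.sum_cons, ih, List.countP_cons]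
    by_cases h : p b <;> simp [h, Nat.add_comm]

theorem sum_map_countP_comm {α β : Type} (A : List α) (B : List β) (p : α → β → Bool) :
    (A.map (fun a => B.countP (fun b => p a b))).sum = (B.map (fun b => A.countP (fun a => p a b))).sum := by
  induction A with
  | nil => simp
  | cons a A' ih =>
    simp only [List.map_cons, List.sum_cons, ih, List.countP_cons]
    rw [sum_map_add_nat B (fun b => List.countP (fun a => p a b) A') (fun b => if p a b = true then 1 else 0),
        sum_map_ite_nat B (fun b => p a b)]
    omega

theorem vcInner_spec (mc : Int) (sc : List Int) : ∀ (gs : List (PySem.Set Int)) (c : Int),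
    (vcInner mc sc gs c).2 = decide (1 ≤ gs.countP (fun g => PySem.Set.issubset (PySem.Set.ofList sc) g) ∧ mc ≤ c + gs.countP (fun g => PySem.Set.issubset (PySem.Set.ofList sc) g)) ∧
    ((vcInner mc sc gs c).2 = false → (vcInner mc sc gs c).1 = c + gs.countP (fun g => PySem.Set.issubset (PySem.Set.ofList sc) g)) := by
  intro gs
  induction gs with
  | nil => intro c; simp [vcInner]
  | cons g gs ih =>
    intro c
    by_cases hg : PySem.Set.issubset (PySem.Set.ofList sc) g = true
    · rw [List.countP_cons_of_pos (pa := by simpa using hg)]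
      by_cases hm : mc ≤ c + 1
      · constructor
        · simp only [vcInner, if_pos hg, if_pos hm]
          symm
          simp only [decide_eq_true_iff]
          push_cast
          simp only [true_and]
          omega
        · simp only [vcInner, if_pos hg, if_pos hm]
          intro h
          exact absurd h (by simp)
      · constructor
        · simp only [vcInner, if_pos hg, if_neg hm, (ih (c+1)).1, decide_eq_decide]
          push_cast
          simp only [true_and]
          omega
        · intro hfalse
          simp only [vcInner, if_pos hg, if_neg hm] at hfalse ⊢
          rw [(ih (c+1)).2 hfalse]
          push_cast
          ring
    · have hg' : PySem.Set.issubset (PySem.Set.ofList sc) g = false := Bool.eq_false_iff.mpr hg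
      rw [List.countP_cons_of_neg (pa := by simp [hg'])]
      constructor
      · simp only [vcInner, if_neg hg, (ih c).1]
      · intro hfalse
        simp only [vcInner, if_neg hg] at hfalse ⊢
        exact (ih c).2 hfalse

theorem vcOuter_spec (mc : Int) (sets : List (PySem.Set Int)) : ∀ (scs : List (List Int)) (c : Int),
    vcOuter mc sets scs c = decide (1 ≤ (scs.map (fun sc => sets.countP (fun g => PySem.Set.issubset (PySem.Set.ofList sc) g))).sum ∧ mc ≤ c + (scs.map (fun sc => sets.countP (fun g => PySem.Set.issubset (PySem.Set.ofList sc) g))).sum) := by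
  intro scs
  induction scs with
  | nil => intro c; simp [vcOuter]
  | cons sc rest ih =>
    intro c
    have hi := vcInner_spec mc sc sets c
    simp only [vcOuter, List.map_cons, List.sum_cons]
    set t := sets.countP (fun g => PySem.Set.issubset (PySem.Set.ofList sc) g) with ht
    set T := (rest.map (fun sc => sets.countP (fun g => PySem.Set.issubset (PySem.Set.ofList sc) g))).sum with hT
    by_cases hcov : (vcInner mc sc sets c).2
    · rw [if_pos hcov]
      rw [hi.1] at hcov
      simp only [decide_eq_true_iff] at hcov
      symm
      simp only [decide_eq_true_iff]
      omega
    · rw [if_neg (by simp [hcov]), ih, hi.2 (by simpa using hcov)]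
      rw [hi.1] at hcov
      simp only [decide_eq_true_iff] at hcov
      rw [decide_eq_decide]
      omega

theorem loose_eq (mc : Int) (sets : List (PySem.Set Int)) (jc : List Int) (s' : Nat) :
    vcOuter mc sets (pyCombos jc s') 0 =
    decide (max mc 1 ≤ (sets.map (fun g => ((Nat.choose (jc.countP (fun x => PySem.Set.contains g x)) s' : Nat) : Int))).sum) := by
  rw [vcOuter_spec]
  have hfub : ((pyCombos jc s').map (fun sc => sets.countP (fun g => PySem.Set.issubset (PySem.Set.ofList sc) g))).sum
      = (sets.map (fun g => (pyCombos jc s').countP (fun sc => PySem.Set.issubset (PySem.Set.ofList sc) g))).sum :=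
    sum_map_countP_comm (pyCombos jc s') sets (fun sc g => PySem.Set.issubset (PySem.Set.ofList sc) g)
  have hch : ∀ g : PySem.Set Int, (pyCombos jc s').countP (fun sc => PySem.Set.issubset (PySem.Set.ofList sc) g)
      = Nat.choose (jc.countP (fun x => PySem.Set.contains g x)) s' := by
    intro g
    rw [List.countP_congr (fun sc _ => by rw [issubset_ofList_eq_all])]
    exact countP_pyCombos (fun x => PySem.Set.contains g x) jc s'
  have hcast : (sets.map (fun g => ((Nat.choose (jc.countP (fun x => PySem.Set.contains g x)) s' : Nat) : Int))).sum
      = ((sets.map (fun g => Nat.choose (jc.countP (fun x => PySem.Set.contains g x)) s')).sum : Int) := by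
    rw [Nat.cast_list_sum, List.map_map]
    rfl
  rw [hfub, hcast]
  have : (sets.map (fun g => (pyCombos jc s').countP (fun sc => PySem.Set.issubset (PySem.Set.ofList sc) g))).sum
      = (sets.map (fun g => Nat.choose (jc.countP (fun x => PySem.Set.contains g x)) s')).sum := by
    congr 1
    exact List.map_congr_left (fun g _ => hch g)
  rw [this, decide_eq_decide]
  omega


theorem strict_eq (sets : List (PySem.Set Int)) (hne : sets ≠ []) (jc : List Int) (j s : Int)
    (hj : 0 ≤ j) (hs : 0 ≤ s) (hlen : jc.length = j.toNat) :
    sets.any (fun g => (pyCombos jc s.toNat).all (fun sc => PySem.Set.issubset (PySem.Set.ofList sc) g)) =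
    (if !(decide (1 ≤ s) && decide (s ≤ j)) then true else sets.any (fun g => jc.all (fun x => PySem.Set.contains g x))) := by
  by_cases h0 : s = 0
  · subst h0
    simp only [Int.toNat_zero, pyCombos]
    rw [if_pos (by simp)]
    rcases List.exists_mem_of_ne_nil _ hne with ⟨g, hg⟩
    rw [Bool.eq_iff_iff]
    simp only [List.any_eq_true]
    refine ⟨fun _ => trivial, fun _ => ⟨g, hg, ?_⟩⟩
    simp [PySem.Set.issubset_iff]
  · by_cases hgt : j < s
    · -- s > j : no s-subsets, vacuously covered; B skips
      have hnil : pyCombos jc s.toNat = [] := pyCombos_eq_nil jc s.toNat (by omega)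
      rw [hnil, if_pos (by simp; omega)]
      rw [Bool.eq_iff_iff]
      simp only [List.any_eq_true]
      rcases List.exists_mem_of_ne_nil _ hne with ⟨g, hg⟩
      exact ⟨fun _ => trivial, fun _ => ⟨g, hg, by simp⟩⟩
    · -- 1 ≤ s ≤ j
      rw [if_neg (by simp; omega)]
      apply list_any_congr
      intro g _
      rw [list_all_congr (fun sc _ => issubset_ofList_eq_all sc g)]
      exact all_pyCombos_all (fun x => PySem.Set.contains g x) jc s.toNat (by omega) (by omega)

-- ===== VERDICT (by name: the statement is the Claim_ definition above) =====

theorem verify_coverage_spec : Claim_equal_verify_coverage := by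
  unfold Claim_equal_verify_coverage
  intro solution n k j s strict_coverage min_cover _hdom hpre
  unfold Spec_verify_coverage
  unfold verify_coverage verify_coverage_alt
  by_cases hemp : solution.isEmpty
  · simp only [hemp, if_pos]
  · rw [if_neg hemp, if_neg hemp]
    by_cases hval : (solution.all fun group => decide ((group.length : Int) = k) && group.all (fun x => decide (0 ≤ x) && decide (x < n))) = true
    · rw [if_neg (by simp [hval]), if_neg (by simp [hval])]
      have hsolne : solution ≠ [] := by simpa using hemp
      have hsetsne : solution.map PySem.Set.ofList ≠ [] := by simp [hsolne]
      -- extract the third disjunct of Pre_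
      have hjs : 0 ≤ j ∧ (0 ≤ s ∨ max n 0 < j) := by
        rcases hpre with h | h | h
        · exact absurd h hsolne
        · exfalso
          rcases h with ⟨g, hg, hbad⟩
          apply hbad
          have := (List.all_eq_true.mp hval) g hg
          simp only [Bool.and_eq_true, decide_eq_true_iff, List.all_eq_true] at this
          exact ⟨this.1, fun x hx => by
            have := this.2 x hx
            simpa using this⟩
        · exact h
      rcases hjs with ⟨hj, hor⟩
      rcases hor with hs | hbig
      · -- 0 ≤ s : pointwise equivalence over the same list of j-combinations
        apply list_all_congr
        intro jc hjc
        have hlen : jc.length = j.toNat := length_of_mem_pyCombos _ _ _ hjc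
        by_cases hstrict : strict_coverage = true
        · rw [hstrict, if_pos rfl, if_pos rfl]
          exact strict_eq (solution.map PySem.Set.ofList) hsetsne jc j s hj hs hlen
        · rw [Bool.not_eq_true] at hstrict
          rw [hstrict]
          simp only [Bool.false_eq_true, if_false]
          exact loose_eq min_cover (solution.map PySem.Set.ofList) jc s.toNat
      · -- j exceeds |range(n)| : there is no j-combination on either side
        have hnil : pyCombos (PySem.List.pyRange 0 n 1) j.toNat = [] := by
          apply pyCombos_eq_nil
          rw [PySem.List.length_pyRange_one]
          omega
        rw [hnil]
        rfl
    · rw [if_pos (by simp [hval]), if_pos (by simp [hval])]
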